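-- pv_equiv track=rewrite | github.com/AdamBray91/Python | mm16ab_10.1.py | composite_checker
-- ===== SOURCE A (Python) =====
-- def composite_checker(primes,c):
--     squares = list(i**2 for i in range(1,100))
--     for p in primes:
--         for s in squares:
--             if p+2*s == c:
--                 return c
--             else:
--                 continue
-- ===== SOURCE B (Python) =====
-- def composite_checker(primes, c):
--     prime_set = set(primes)
--     for k in range(1, 100):
--         if c - 2 * k * k in prime_set:
--             return c
--     return None
-- ===== Notes on version B (the rewrite author's own statement) =====
-- stated objective: faster
-- what changed: Replaces the nested primes x squares scan with a single pass over the 99 candidate squares, testing c - 2*k*k against a prime set built once.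
import Mathlib
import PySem

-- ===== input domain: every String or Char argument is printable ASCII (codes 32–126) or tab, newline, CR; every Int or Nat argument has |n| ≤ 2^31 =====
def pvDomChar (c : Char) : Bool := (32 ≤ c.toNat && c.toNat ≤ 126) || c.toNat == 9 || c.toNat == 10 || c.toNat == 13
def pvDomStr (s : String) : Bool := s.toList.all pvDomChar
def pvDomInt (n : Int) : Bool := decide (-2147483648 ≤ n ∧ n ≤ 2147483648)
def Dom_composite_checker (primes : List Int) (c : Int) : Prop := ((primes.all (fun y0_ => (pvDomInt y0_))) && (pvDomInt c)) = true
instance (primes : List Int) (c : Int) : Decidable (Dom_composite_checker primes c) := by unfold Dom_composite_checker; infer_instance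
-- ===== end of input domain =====

-- B replaces A's nested primes × squares scan with one pass over the 99 squares and a set lookup.

-- ===== PORT A =====
-- inner 'for s in squares: if p+2*s == c: return c'
def pvInnerA (squares : List Int) (p c : Int) : Option Int :=
  match squares with
  | [] => none
  | s :: rest => if p + 2 * s = c then some c else pvInnerA rest p c

-- outer 'for p in primes: …'; falls through to implicit None
def pvOuterA (primes squares : List Int) (c : Int) : Option Int :=
  match primes with
  | [] => none
  | p :: rest =>
    match pvInnerA squares p c with
    | some v => some v
    | none => pvOuterA rest squares c

def composite_checker (primes : List Int) (c : Int) : Option Int :=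
  let squares := (PySem.List.pyRange 1 100 1).map (fun i => i ^ 2)
  pvOuterA primes squares c

-- ===== PORT B =====
-- 'for k in range(1,100): if c - 2*k*k in prime_set: return c'; then 'return None'
def pvLoopB (ks : List Int) (pset : PySem.Set Int) (c : Int) : Option Int :=
  match ks with
  | [] => none
  | k :: rest => if PySem.Set.contains pset (c - 2 * k * k) then some c else pvLoopB rest pset c

def composite_checker_alt (primes : List Int) (c : Int) : Option Int :=
  let prime_set := PySem.Set.ofList primes
  pvLoopB (PySem.List.pyRange 1 100 1) prime_set c

-- ===== PRECONDITION & SPEC =====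
def Spec_composite_checker (primes : List Int) (c : Int) (out : Option Int) : Prop := out = composite_checker_alt primes c
instance (primes : List Int) (c : Int) (out : Option Int) : Decidable (Spec_composite_checker primes c out) := by unfold Spec_composite_checker; infer_instance

-- ===== CLAIM (what is proved, stated in full; the proofs are below) =====
def Claim_equal_composite_checker : Prop := ∀ (primes : List Int) (c : Int), Dom_composite_checker primes c → Spec_composite_checker primes c (composite_checker primes c)

-- ===== LEMMAS AND PROOFS =====

theorem pvInnerA_eq (squares : List Int) (p c : Int) :
    pvInnerA squares p c = if squares.any (fun s => p + 2 * s == c) then some c else none := by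
  induction squares with
  | nil => rfl
  | cons s rest ih =>
    simp only [pvInnerA, List.any_cons, ih]
    by_cases h : p + 2 * s = c <;> simp [h]

theorem pvOuterA_eq (primes squares : List Int) (c : Int) :
    pvOuterA primes squares c =
      if primes.any (fun p => squares.any (fun s => p + 2 * s == c)) then some c else none := by
  induction primes with
  | nil => rfl
  | cons p rest ih =>
    simp only [pvOuterA, pvInnerA_eq, List.any_cons, ih]
    by_cases h : squares.any (fun s => p + 2 * s == c) <;> simp [h]

theorem pvLoopB_eq (ks : List Int) (pset : PySem.Set Int) (c : Int) :
    pvLoopB ks pset c =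
      if ks.any (fun k => PySem.Set.contains pset (c - 2 * k * k)) then some c else none := by
  induction ks with
  | nil => rfl
  | cons k rest ih =>
    simp only [pvLoopB, List.any_cons, ih]
    by_cases h : PySem.Set.contains pset (c - 2 * k * k) = true <;> simp_all

theorem pv_cond_iff (primes : List Int) (c : Int) :
    ((PySem.List.pyRange 1 100 1).any
        (fun k => PySem.Set.contains (PySem.Set.ofList primes) (c - 2 * k * k)) = true) ↔
      (primes.any (fun p =>
        (((PySem.List.pyRange 1 100 1).map (fun i => i ^ 2)).any (fun s => p + 2 * s == c))) = true) := by
  simp only [List.any_map, List.any_eq_true, Function.comp, beq_iff_eq,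
    PySem.Set.contains, List.contains_iff_mem, PySem.Set.mem_ofList]
  constructor
  · rintro ⟨k, hk, hp⟩
    exact ⟨c - 2 * k * k, hp, k, hk, by ring⟩
  · rintro ⟨p, hp, k, hk, he⟩
    refine ⟨k, hk, ?_⟩
    have : p = c - 2 * k * k := by nlinarith [sq_nonneg k, he]
    rwa [← this]

-- ===== VERDICT (by name: the statement is the Claim_ definition above) =====
theorem composite_checker_spec : Claim_equal_composite_checker := by
  intro primes c _
  show composite_checker primes c = composite_checker_alt primes c
  simp only [composite_checker, composite_checker_alt, pvOuterA_eq, pvLoopB_eq]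
  by_cases h : (PySem.List.pyRange 1 100 1).any
      (fun k => PySem.Set.contains (PySem.Set.ofList primes) (c - 2 * k * k)) = true
  · rw [if_pos ((pv_cond_iff primes c).mp h), if_pos h]
  · rw [if_neg (fun hh => h ((pv_cond_iff primes c).mpr hh)), if_neg h]
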